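-- pv_equiv track=rewrite | github.com/dvdrndlph/pydactyl | pydactyl/util/DExperiment.py | soft_match_count
-- ===== SOURCE A (Python) =====
-- def soft_match_count(predicted, ground_truths):
--     pred_len = len(predicted)
--     gt_len = len(ground_truths[0])
--     if gt_len == 0:
--         raise Exception("Phrase is zero length.")
--     if gt_len != pred_len:
--         raise Exception("Counts do not match.")
--     match_bits = [0 for i in range(pred_len)]
--     for ground_truth in ground_truths:
--         for i in range(pred_len):
--             if predicted[i] == ground_truth[i]:
--                 match_bits[i] = 1
--     match_count = sum(match_bits)
--     return match_count
-- ===== SOURCE B (Python) =====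
-- def soft_match_count(predicted, ground_truths):
--     pred_len = len(predicted)
--     gt_len = len(ground_truths[0])
--     if gt_len == 0:
--         raise Exception("Phrase is zero length.")
--     if gt_len != pred_len:
--         raise Exception("Counts do not match.")
--     return sum(1 for i in range(pred_len)
--                if any(predicted[i] == gt[i] for gt in ground_truths))
-- ===== Notes on version B (the rewrite author's own statement) =====
-- stated objective: simpler
-- what changed: Replaces the outer-over-ground_truths/inner-over-positions nesting that maintains and overwrites a match_bits array with a single per-position pass that counts positions where any ground truth matches, with no intermediate array.
import Mathlib
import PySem

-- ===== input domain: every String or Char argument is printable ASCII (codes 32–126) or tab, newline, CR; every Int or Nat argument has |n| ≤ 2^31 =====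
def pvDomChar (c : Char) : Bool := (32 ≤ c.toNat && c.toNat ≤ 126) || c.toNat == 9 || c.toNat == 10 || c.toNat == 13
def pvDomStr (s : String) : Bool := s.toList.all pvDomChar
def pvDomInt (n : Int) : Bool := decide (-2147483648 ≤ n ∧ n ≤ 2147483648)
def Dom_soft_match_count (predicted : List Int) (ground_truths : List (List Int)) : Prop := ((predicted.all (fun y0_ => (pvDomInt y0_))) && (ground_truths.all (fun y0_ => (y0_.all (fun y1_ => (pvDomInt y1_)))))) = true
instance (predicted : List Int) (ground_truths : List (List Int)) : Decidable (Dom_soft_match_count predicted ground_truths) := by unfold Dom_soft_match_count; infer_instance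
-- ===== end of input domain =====

-- B replaces A's match_bits array (overwritten across the ground-truth loop) by a direct
-- per-position count of positions matched by some ground truth: simpler, no intermediate array.

-- ===== PORT A =====
-- Literal port of A. Indices i come from range(pred_len) and under Pre_ every list
-- indexed has length ≥ pred_len, so xs[i] is ported exactly by xs.getD i 0 (never hit default).
def soft_match_count (predicted : List Int) (ground_truths : List (List Int)) : Int :=
  let pred_len := predicted.length
  let match_bits : List Int := (List.range pred_len).map (fun _ => 0)
  let match_bits :=
    ground_truths.foldl (fun mb ground_truth =>
      (List.range pred_len).foldl (fun mb i =>
        if predicted.getD i 0 = ground_truth.getD i 0 then mb.set i 1 else mb) mb) match_bits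
  match_bits.sum

-- ===== PORT B =====
-- sum(1 for i in range(pred_len) if any(...)) is a count over range(pred_len).
def soft_match_count_alt (predicted : List Int) (ground_truths : List (List Int)) : Int :=
  ((List.range predicted.length).countP (fun i =>
      ground_truths.any (fun gt => predicted.getD i 0 == gt.getD i 0)) : Nat)

-- ===== PRECONDITION & SPEC =====
-- Pre_ excludes exactly the inputs where A raises: empty ground_truths (IndexError on
-- ground_truths[0]), zero-length or mismatched first ground truth (explicit Exceptions),
-- and any ground truth shorter than predicted (IndexError in the inner loop).
def Pre_soft_match_count (predicted : List Int) (ground_truths : List (List Int)) : Prop :=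
  ground_truths ≠ [] ∧ predicted.length ≠ 0 ∧
  (ground_truths.headD []).length = predicted.length ∧
  ∀ gt ∈ ground_truths, predicted.length ≤ gt.length

instance (predicted : List Int) (ground_truths : List (List Int)) : Decidable (Pre_soft_match_count predicted ground_truths) := by unfold Pre_soft_match_count; infer_instance

def pvWitness_soft_match_count : List Int × List (List Int) := ([1, 2], [[1, 3], [0, 2]])

def Spec_soft_match_count (predicted : List Int) (ground_truths : List (List Int)) (out : Int) : Prop := out = soft_match_count_alt predicted ground_truths
instance (predicted : List Int) (ground_truths : List (List Int)) (out : Int) : Decidable (Spec_soft_match_count predicted ground_truths out) := by unfold Spec_soft_match_count; infer_instance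

-- ===== CLAIM (what is proved, stated in full; the proofs are below) =====
def Claim_equal_soft_match_count : Prop := ∀ (predicted : List Int) (ground_truths : List (List Int)), Dom_soft_match_count predicted ground_truths → Pre_soft_match_count predicted ground_truths → Spec_soft_match_count predicted ground_truths (soft_match_count predicted ground_truths)

-- ===== LEMMAS AND PROOFS =====

-- setting index i < n in a map over range n
lemma map_range_set (n i : Nat) (f : Nat → Int) (v : Int) :
    ((List.range n).map f).set i v = (List.range n).map (fun j => if j = i then v else f j) := by
  apply List.ext_getElem
  · simp
  · intro k h1 h2
    simp only [List.length_set, List.length_map, List.length_range] at h1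
    simp [List.getElem_set, List.getElem_map, List.getElem_range]
    by_cases h : k = i
    · simp [h]
    · simp [h, Ne.symm h]

-- the inner index loop for one ground truth
lemma inner_fold (n : Nat) (P : Nat → Prop) [DecidablePred P] :
    ∀ (l : List Nat) (f : Nat → Int),
    l.foldl (fun mb i => if P i then mb.set i 1 else mb) ((List.range n).map f)
      = (List.range n).map (fun j => if j ∈ l ∧ P j then 1 else f j) := by
  intro l
  induction l with
  | nil => intro f; simp
  | cons i l' ih =>
    intro f
    simp only [List.foldl_cons]
    by_cases hP : P i
    · rw [if_pos hP, map_range_set n i f 1, ih]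
      apply List.map_congr_left
      intro j _
      by_cases hji : j = i
      · subst hji; simp [hP]
      · simp [List.mem_cons, hji]
    · rw [if_neg hP, ih]
      apply List.map_congr_left
      intro j _
      by_cases hji : j = i
      · subst hji; simp [hP]
      · simp [List.mem_cons, hji]

-- the outer loop over ground truths
lemma outer_fold (predicted : List Int) (n : Nat) :
    ∀ (gts : List (List Int)) (f : Nat → Int),
    gts.foldl (fun mb gt =>
        (List.range n).foldl (fun mb i =>
          if predicted.getD i 0 = gt.getD i 0 then mb.set i 1 else mb) mb)
      ((List.range n).map f)
      = (List.range n).map (fun j =>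
          if ∃ gt ∈ gts, predicted.getD j 0 = gt.getD j 0 then 1 else f j) := by
  intro gts
  induction gts with
  | nil => intro f; simp
  | cons gt gts ih =>
    intro f
    simp only [List.foldl_cons]
    rw [inner_fold n (fun i => predicted.getD i 0 = gt.getD i 0) (List.range n) f, ih]
    apply List.map_congr_left
    intro j hj
    have hjn : j < n := List.mem_range.mp hj
    simp only [List.mem_range, List.mem_cons]
    split_ifs <;> simp_all
    tauto

-- ===== VERDICT (by name: the statement is the Claim_ definition above) =====
theorem soft_match_count_spec : Claim_equal_soft_match_count := by
  intro predicted ground_truths _ _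
  unfold Spec_soft_match_count soft_match_count soft_match_count_alt
  simp only
  rw [outer_fold predicted predicted.length ground_truths (fun _ => 0)]
  have hmap : (List.range predicted.length).map
        (fun j => if ∃ gt ∈ ground_truths, predicted.getD j 0 = gt.getD j 0 then (1 : Int) else 0)
      = (List.range predicted.length).map
        (fun j => if (ground_truths.any fun gt => predicted.getD j 0 == gt.getD j 0) = true then (1 : Int) else 0) := by
    apply List.map_congr_left
    intro j _
    exact if_congr (by simp [List.any_eq_true]) rfl rfl
  rw [hmap, PySem.List.sum_map_ite_one_zero]
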